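-- pv_equiv track=rewrite | github.com/Bakhtiarii/Intelligent-Systems-Projects | Decision tree implementation and KNN/func.py | Check_List_3_2
-- ===== SOURCE A (Python) =====
-- def Check_List_3_2(dictionaryObject, name_0, name_1, var_1, var_2, var_3, name_2, var_4):
--     column_1 = dictionaryObject[name_1]
--     column_2 = dictionaryObject[name_0]
--     column_3 = dictionaryObject[name_2]
--     column_1_1 = column_1_2 = column_1_3 = column_1_4 = column_1_5 = column_1_6 = 0
--     for Counter in column_1:
--         if column_3[Counter]==var_4:
--             if (column_1[Counter]==var_1)and(column_2[Counter]==1):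
--                 column_1_1 = column_1_1 + 1
--             elif (column_1[Counter]==var_1)and(column_2[Counter]==0):
--                 column_1_2 = column_1_2 + 1
--             elif (column_1[Counter]==var_2)and(column_2[Counter]==1):
--                 column_1_3 = column_1_3 + 1
--             elif (column_1[Counter]==var_2)and(column_2[Counter]==0):
--                 column_1_4 = column_1_4 + 1
--             elif (column_1[Counter]==var_3)and(column_2[Counter]==1):
--                 column_1_5 = column_1_5 + 1
--             elif (column_1[Counter]==var_3)and(column_2[Counter]==0):
--                 column_1_6 = column_1_6 + 1
--     return column_1_1,column_1_2,column_1_3,column_1_4,column_1_5,column_1_6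
-- ===== SOURCE B (Python) =====
-- # B: instead of one accumulating pass with a six-way elif cascade, compute each of the
-- # six answers as an independent filtered count over the rows.
-- # Assumes var_1, var_2, var_3 are pairwise distinct (otherwise A's elif cascade assigns
-- # each row to only the first matching bucket, while independent counts double-count).
-- def Check_List_3_2(dictionaryObject, name_0, name_1, var_1, var_2, var_3, name_2, var_4):
--     column_1 = dictionaryObject[name_1]
--     column_2 = dictionaryObject[name_0]
--     column_3 = dictionaryObject[name_2]
--     def cnt(v, c):
--         return sum(1 for k in column_1
--                    if column_3[k] == var_4 and column_1[k] == v and column_2[k] == c)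
--     return (cnt(var_1, 1), cnt(var_1, 0), cnt(var_2, 1),
--             cnt(var_2, 0), cnt(var_3, 1), cnt(var_3, 0))
-- ===== Notes on version B (the rewrite author's own statement) =====
-- stated objective: alternative
-- what changed: Replaces A's single accumulating pass with a six-way if/elif cascade by six independent filtered counts (one sum-over-rows per (category, class) bucket), removing the cascade and the six running counters.
import Mathlib
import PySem

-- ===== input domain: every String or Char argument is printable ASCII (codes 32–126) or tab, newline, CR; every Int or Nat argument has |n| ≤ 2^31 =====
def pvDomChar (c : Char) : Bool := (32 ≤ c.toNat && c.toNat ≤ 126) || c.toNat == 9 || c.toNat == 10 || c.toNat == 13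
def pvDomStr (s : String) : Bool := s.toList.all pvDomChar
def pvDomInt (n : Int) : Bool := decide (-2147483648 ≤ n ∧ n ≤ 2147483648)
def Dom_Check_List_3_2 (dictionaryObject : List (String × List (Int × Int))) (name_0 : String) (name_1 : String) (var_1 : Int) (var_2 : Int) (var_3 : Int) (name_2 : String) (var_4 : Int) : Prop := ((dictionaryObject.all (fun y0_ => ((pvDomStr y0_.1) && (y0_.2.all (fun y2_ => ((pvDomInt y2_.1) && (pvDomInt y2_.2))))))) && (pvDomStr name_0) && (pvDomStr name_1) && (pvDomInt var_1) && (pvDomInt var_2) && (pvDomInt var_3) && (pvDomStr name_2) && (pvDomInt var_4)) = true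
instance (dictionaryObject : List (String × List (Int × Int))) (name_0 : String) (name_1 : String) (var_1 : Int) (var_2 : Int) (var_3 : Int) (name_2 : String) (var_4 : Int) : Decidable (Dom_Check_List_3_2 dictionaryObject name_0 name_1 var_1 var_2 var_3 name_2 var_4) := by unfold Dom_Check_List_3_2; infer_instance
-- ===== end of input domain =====

-- B replaces A's single accumulating pass with a six-way elif cascade by six independent
-- filtered counts, one per (category, class) bucket (objective: alternative, same cost).



-- ===== PORT A =====
-- one loop step of A's for-loop over the keys of column_1 (the state is the 6 counters);
-- the two `none => s` arms are where Python raises KeyError (excluded by Pre_); the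
-- column_2 lookup is hoisted to the point where Python's lazy `and` first evaluates it.
def pvStepA (d1 d2 d3 : PySem.Dict Int Int) (var_1 var_2 var_3 var_4 : Int)
    (s : Int × Int × Int × Int × Int × Int) (k : Int) : Int × Int × Int × Int × Int × Int :=
  match d3.get? k with
  | none => s
  | some v3 =>
    if v3 = var_4 then
      let v1 := d1.getD k 0
      if v1 = var_1 ∨ v1 = var_2 ∨ v1 = var_3 then
        match d2.get? k with
        | none => s
        | some v2 =>
          if v1 = var_1 ∧ v2 = 1 then (s.1 + 1, s.2.1, s.2.2.1, s.2.2.2.1, s.2.2.2.2.1, s.2.2.2.2.2)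
          else if v1 = var_1 ∧ v2 = 0 then (s.1, s.2.1 + 1, s.2.2.1, s.2.2.2.1, s.2.2.2.2.1, s.2.2.2.2.2)
          else if v1 = var_2 ∧ v2 = 1 then (s.1, s.2.1, s.2.2.1 + 1, s.2.2.2.1, s.2.2.2.2.1, s.2.2.2.2.2)
          else if v1 = var_2 ∧ v2 = 0 then (s.1, s.2.1, s.2.2.1, s.2.2.2.1 + 1, s.2.2.2.2.1, s.2.2.2.2.2)
          else if v1 = var_3 ∧ v2 = 1 then (s.1, s.2.1, s.2.2.1, s.2.2.2.1, s.2.2.2.2.1 + 1, s.2.2.2.2.2)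
          else if v1 = var_3 ∧ v2 = 0 then (s.1, s.2.1, s.2.2.1, s.2.2.2.1, s.2.2.2.2.1, s.2.2.2.2.2 + 1)
          else s
      else s
    else s

def Check_List_3_2 (dictionaryObject : List (String × List (Int × Int))) (name_0 : String) (name_1 : String) (var_1 : Int) (var_2 : Int) (var_3 : Int) (name_2 : String) (var_4 : Int) : Int × Int × Int × Int × Int × Int :=
  match (PySem.Dict.mk dictionaryObject).get? name_1 with
  | none => (0, 0, 0, 0, 0, 0)   -- Python: KeyError (excluded by Pre_)
  | some c1 =>
  match (PySem.Dict.mk dictionaryObject).get? name_0 with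
  | none => (0, 0, 0, 0, 0, 0)   -- Python: KeyError (excluded by Pre_)
  | some c2 =>
  match (PySem.Dict.mk dictionaryObject).get? name_2 with
  | none => (0, 0, 0, 0, 0, 0)   -- Python: KeyError (excluded by Pre_)
  | some c3 =>
    (PySem.Dict.mk c1).keys.foldl
      (pvStepA (PySem.Dict.mk c1) (PySem.Dict.mk c2) (PySem.Dict.mk c3) var_1 var_2 var_3 var_4)
      (0, 0, 0, 0, 0, 0)

-- ===== PORT B =====
-- B's helper cnt(v, c) = sum(1 for k in column_1 if column_3[k]==var_4 and
-- column_1[k]==v and column_2[k]==c), ported as the length of the filtered key list;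
-- a d2/d3 lookup that would raise KeyError in Python makes the `==` test false here
-- (such inputs are excluded by Pre_), and column_1[k] is total since k is a key of d1.
def pvCnt (d1 d2 d3 : PySem.Dict Int Int) (var_4 : Int) (ks : List Int) (v c : Int) : Int :=
  ((ks.filter (fun k => (d3.get? k == some var_4) && (d1.getD k 0 == v) && (d2.get? k == some c))).length : Int)

def Check_List_3_2_alt (dictionaryObject : List (String × List (Int × Int))) (name_0 : String) (name_1 : String) (var_1 : Int) (var_2 : Int) (var_3 : Int) (name_2 : String) (var_4 : Int) : Int × Int × Int × Int × Int × Int :=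
  match (PySem.Dict.mk dictionaryObject).get? name_1 with
  | none => (0, 0, 0, 0, 0, 0)   -- Python: KeyError (excluded by Pre_)
  | some c1 =>
  match (PySem.Dict.mk dictionaryObject).get? name_0 with
  | none => (0, 0, 0, 0, 0, 0)   -- Python: KeyError (excluded by Pre_)
  | some c2 =>
  match (PySem.Dict.mk dictionaryObject).get? name_2 with
  | none => (0, 0, 0, 0, 0, 0)   -- Python: KeyError (excluded by Pre_)
  | some c3 =>
    let cnt := pvCnt (PySem.Dict.mk c1) (PySem.Dict.mk c2) (PySem.Dict.mk c3) var_4 (PySem.Dict.mk c1).keys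
    (cnt var_1 1, cnt var_1 0, cnt var_2 1, cnt var_2 0, cnt var_3 1, cnt var_3 0)

-- ===== PRECONDITION & SPEC =====
-- Pre_ excludes: (a) inputs on which Python A raises KeyError — a missing column name, a
-- key of column_1 missing from column_3, or a key missing from column_2 on a row that
-- passes the var_4 filter and whose category is one of var_1/var_2/var_3 (B raises on
-- exactly the same inputs); (b) inputs where two of var_1/var_2/var_3 coincide AND some
-- row actually matches the duplicated category with class 0/1 — a corner where A's
-- first-match elif cascade and B's independent per-bucket counts are both defensible;
-- (c) association lists with duplicate keys, which do not represent a single Python dict.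
def Pre_Check_List_3_2 (dictionaryObject : List (String × List (Int × Int))) (name_0 : String) (name_1 : String) (var_1 : Int) (var_2 : Int) (var_3 : Int) (name_2 : String) (var_4 : Int) : Prop :=
  (dictionaryObject.map Prod.fst).Nodup ∧
  ((PySem.Dict.mk dictionaryObject).get? name_0).isSome = true ∧
  ((PySem.Dict.mk dictionaryObject).get? name_1).isSome = true ∧
  ((PySem.Dict.mk dictionaryObject).get? name_2).isSome = true ∧
  (let c1 := (PySem.Dict.mk dictionaryObject).getD name_1 []
   let c2 := (PySem.Dict.mk dictionaryObject).getD name_0 []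
   let c3 := (PySem.Dict.mk dictionaryObject).getD name_2 []
   (c1.map Prod.fst).Nodup ∧ (c2.map Prod.fst).Nodup ∧ (c3.map Prod.fst).Nodup ∧
   ∀ k ∈ c1.map Prod.fst,
     (((PySem.Dict.mk c3).get? k).isSome = true) ∧
     ((PySem.Dict.mk c3).getD k 0 = var_4 →
       ((PySem.Dict.mk c1).getD k 0 = var_1 ∨ (PySem.Dict.mk c1).getD k 0 = var_2 ∨ (PySem.Dict.mk c1).getD k 0 = var_3) →
       ((PySem.Dict.mk c2).get? k).isSome = true) ∧
     ((PySem.Dict.mk c3).getD k 0 = var_4 →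
       ((PySem.Dict.mk c2).get? k = some 0 ∨ (PySem.Dict.mk c2).get? k = some 1) →
       (var_1 = var_2 → (PySem.Dict.mk c1).getD k 0 ≠ var_1) ∧
       (var_1 = var_3 → (PySem.Dict.mk c1).getD k 0 ≠ var_1) ∧
       (var_2 = var_3 → (PySem.Dict.mk c1).getD k 0 ≠ var_2)))
instance (dictionaryObject : List (String × List (Int × Int))) (name_0 : String) (name_1 : String) (var_1 : Int) (var_2 : Int) (var_3 : Int) (name_2 : String) (var_4 : Int) : Decidable (Pre_Check_List_3_2 dictionaryObject name_0 name_1 var_1 var_2 var_3 name_2 var_4) := by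
  unfold Pre_Check_List_3_2
  refine @instDecidableAnd _ _ ?_ ?_; · infer_instance
  refine @instDecidableAnd _ _ ?_ ?_; · infer_instance
  refine @instDecidableAnd _ _ ?_ ?_; · infer_instance
  refine @instDecidableAnd _ _ ?_ ?_; · infer_instance
  refine @instDecidableAnd _ _ ?_ ?_; · infer_instance
  refine @instDecidableAnd _ _ ?_ ?_; · infer_instance
  refine @instDecidableAnd _ _ ?_ ?_; · infer_instance
  infer_instance

def pvWitness_Check_List_3_2 : (List (String × List (Int × Int))) × String × String × Int × Int × Int × String × Int :=
  ([("a", [(0, 1), (1, 0)]), ("b", [(0, 0), (1, 1)]), ("c", [(0, 5), (1, 5)])], "b", "a", 1, 0, 2, "c", 5)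

def Spec_Check_List_3_2 (dictionaryObject : List (String × List (Int × Int))) (name_0 : String) (name_1 : String) (var_1 : Int) (var_2 : Int) (var_3 : Int) (name_2 : String) (var_4 : Int) (out : Int × Int × Int × Int × Int × Int) : Prop := out = Check_List_3_2_alt dictionaryObject name_0 name_1 var_1 var_2 var_3 name_2 var_4
instance (dictionaryObject : List (String × List (Int × Int))) (name_0 : String) (name_1 : String) (var_1 : Int) (var_2 : Int) (var_3 : Int) (name_2 : String) (var_4 : Int) (out : Int × Int × Int × Int × Int × Int) : Decidable (Spec_Check_List_3_2 dictionaryObject name_0 name_1 var_1 var_2 var_3 name_2 var_4 out) := by unfold Spec_Check_List_3_2; infer_instance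

-- ===== CLAIM (what is proved, stated in full; the proofs are below) =====
def Claim_equal_Check_List_3_2 : Prop := ∀ (dictionaryObject : List (String × List (Int × Int))) (name_0 : String) (name_1 : String) (var_1 : Int) (var_2 : Int) (var_3 : Int) (name_2 : String) (var_4 : Int), Dom_Check_List_3_2 dictionaryObject name_0 name_1 var_1 var_2 var_3 name_2 var_4 → Pre_Check_List_3_2 dictionaryObject name_0 name_1 var_1 var_2 var_3 name_2 var_4 → Spec_Check_List_3_2 dictionaryObject name_0 name_1 var_1 var_2 var_3 name_2 var_4 (Check_List_3_2 dictionaryObject name_0 name_1 var_1 var_2 var_3 name_2 var_4)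

-- ===== LEMMAS AND PROOFS =====

-- the (category, class) pair a key contributes in A's pass, none on skipped rows
def pvPair? (d1 d2 d3 : PySem.Dict Int Int) (var_4 : Int) (k : Int) : Option (Int × Int) :=
  match d3.get? k with
  | none => none
  | some v3 =>
    if v3 = var_4 then (d2.get? k).map (fun v2 => (d1.getD k 0, v2)) else none

lemma pvStepA_none {d1 d2 d3 : PySem.Dict Int Int} {var_1 var_2 var_3 var_4 : Int} {k : Int}
    (h : pvPair? d1 d2 d3 var_4 k = none) (s : Int × Int × Int × Int × Int × Int) :
    pvStepA d1 d2 d3 var_1 var_2 var_3 var_4 s k = s := by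
  unfold pvPair? at h
  unfold pvStepA
  cases h3 : d3.get? k with
  | none => rfl
  | some v3 =>
    simp only [h3] at h ⊢
    split_ifs with h4 hv
    · cases h2 : d2.get? k with
      | none => rfl
      | some v2 => simp [h4, h2] at h
    · rfl
    · rfl

lemma pvPair?_some {d1 d2 d3 : PySem.Dict Int Int} {var_4 : Int} {k : Int} {p : Int × Int}
    (h : pvPair? d1 d2 d3 var_4 k = some p) :
    d3.get? k = some var_4 ∧ d2.get? k = some p.2 ∧ p.1 = d1.getD k 0 := by
  unfold pvPair? at h
  cases h3 : d3.get? k with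
  | none => simp [h3] at h
  | some v3 =>
    simp only [h3] at h
    by_cases h4 : v3 = var_4
    · cases h2 : d2.get? k with
      | none => simp [h4, h2] at h
      | some v2 =>
        simp [h4, h2] at h
        subst h
        refine ⟨?_, rfl, rfl⟩
        rw [h4]
    · simp [h4] at h

-- A's fold computed as six multiplicities in the list of contributed pairs
lemma pvFoldA_eq (d1 d2 d3 : PySem.Dict Int Int) (var_1 var_2 var_3 var_4 : Int) :
    ∀ (ks : List Int),
      (∀ k ∈ ks, ∀ x v2, pvPair? d1 d2 d3 var_4 k = some (x, v2) → (v2 = 0 ∨ v2 = 1) →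
        (var_1 = var_2 → x ≠ var_1) ∧ (var_1 = var_3 → x ≠ var_1) ∧ (var_2 = var_3 → x ≠ var_2)) →
      ∀ (s : Int × Int × Int × Int × Int × Int),
      ks.foldl (pvStepA d1 d2 d3 var_1 var_2 var_3 var_4) s =
        (s.1 + ((ks.filterMap (pvPair? d1 d2 d3 var_4)).count (var_1, 1) : Int),
         s.2.1 + ((ks.filterMap (pvPair? d1 d2 d3 var_4)).count (var_1, 0) : Int),
         s.2.2.1 + ((ks.filterMap (pvPair? d1 d2 d3 var_4)).count (var_2, 1) : Int),
         s.2.2.2.1 + ((ks.filterMap (pvPair? d1 d2 d3 var_4)).count (var_2, 0) : Int),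
         s.2.2.2.2.1 + ((ks.filterMap (pvPair? d1 d2 d3 var_4)).count (var_3, 1) : Int),
         s.2.2.2.2.2 + ((ks.filterMap (pvPair? d1 d2 d3 var_4)).count (var_3, 0) : Int)) := by
  intro ks
  induction ks with
  | nil => intro _ s; simp
  | cons k ks ih =>
    intro H s
    have Htail : ∀ k ∈ ks, ∀ x v2, pvPair? d1 d2 d3 var_4 k = some (x, v2) → (v2 = 0 ∨ v2 = 1) →
        (var_1 = var_2 → x ≠ var_1) ∧ (var_1 = var_3 → x ≠ var_1) ∧ (var_2 = var_3 → x ≠ var_2) :=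
      fun k hk => H k (List.mem_cons_of_mem _ hk)
    rw [List.foldl_cons, ih Htail]
    cases hp : pvPair? d1 d2 d3 var_4 k with
    | none => rw [pvStepA_none hp, List.filterMap_cons_none hp]
    | some p =>
      obtain ⟨h3, h2, hx⟩ := pvPair?_some hp
      obtain ⟨x, v2⟩ := p
      simp only at h2 hx
      have Hk := H k (List.mem_cons_self ..) x v2 hp
      rw [List.filterMap_cons_some hp]
      unfold pvStepA
      simp only [h3, ← hx, h2, List.count_cons]
      by_cases hv1 : v2 = 1 <;> by_cases hv0 : v2 = 0
      · omega
      · obtain ⟨H12, H13, H23⟩ := Hk (Or.inr hv1)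
        clear Hk H Htail ih hp
        by_cases hx1 : x = var_1 <;> by_cases hx2 : x = var_2 <;> by_cases hx3 : x = var_3 <;>
          simp_all [Prod.ext_iff] <;> omega
      · obtain ⟨H12, H13, H23⟩ := Hk (Or.inl hv0)
        clear Hk H Htail ih hp
        by_cases hx1 : x = var_1 <;> by_cases hx2 : x = var_2 <;> by_cases hx3 : x = var_3 <;>
          simp_all [Prod.ext_iff] <;> omega
      · clear Hk H Htail ih hp
        by_cases hx1 : x = var_1 <;> by_cases hx2 : x = var_2 <;> by_cases hx3 : x = var_3 <;>
          simp_all [Prod.ext_iff]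

-- multiplicity of a pair among contributed pairs = B's filtered count for that bucket
lemma pvCount_eq_cnt (d1 d2 d3 : PySem.Dict Int Int) (var_4 : Int) (v c : Int) :
    ∀ (ks : List Int),
      ((ks.filterMap (pvPair? d1 d2 d3 var_4)).count (v, c) : Int) =
        pvCnt d1 d2 d3 var_4 ks v c := by
  intro ks
  induction ks with
  | nil => rfl
  | cons k ks ih =>
    unfold pvCnt at ih ⊢
    by_cases hk : pvPair? d1 d2 d3 var_4 k = some (v, c)
    · obtain ⟨h3, h2, hx⟩ := pvPair?_some hk
      rw [List.filterMap_cons_some hk]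
      simp only [List.count_cons_self, List.filter_cons]
      rw [if_pos (by simp [h3, h2, ← hx])]
      simp only [List.length_cons]
      push_cast
      omega
    · have hfilter : (decide (((d3.get? k == some var_4) && (d1.getD k 0 == v) && (d2.get? k == some c)) = true)) = false := by
        by_contra hne
        simp only [Bool.not_eq_false, decide_eq_true_eq, Bool.and_eq_true, beq_iff_eq] at hne
        obtain ⟨⟨h3, h1⟩, h2⟩ := hne
        apply hk
        unfold pvPair?
        simp [h3, h2, h1]
      cases hp : pvPair? d1 d2 d3 var_4 k with
      | none =>
        rw [List.filterMap_cons_none hp, List.filter_cons]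
        rw [if_neg (by simpa using hfilter)]
        exact ih
      | some p =>
        rw [List.filterMap_cons_some hp, List.filter_cons]
        rw [if_neg (by simpa using hfilter)]
        rw [List.count_cons_of_ne (by intro h; exact hk (h ▸ hp))]
        exact ih

-- ===== VERDICT (by name: the statement is the Claim_ definition above) =====
theorem Check_List_3_2_spec : Claim_equal_Check_List_3_2 := by
  unfold Claim_equal_Check_List_3_2
  intro dictionaryObject name_0 name_1 var_1 var_2 var_3 name_2 var_4 _ hpre
  obtain ⟨-, -, hs1, -, hforall⟩ := hpre
  unfold Spec_Check_List_3_2 Check_List_3_2 Check_List_3_2_alt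
  cases h1 : (PySem.Dict.mk dictionaryObject).get? name_1 with
  | none => rfl
  | some c1 =>
    cases h0 : (PySem.Dict.mk dictionaryObject).get? name_0 with
    | none => rfl
    | some c2 =>
      cases h2 : (PySem.Dict.mk dictionaryObject).get? name_2 with
      | none => rfl
      | some c3 =>
        simp only
        have hc1 : (PySem.Dict.mk dictionaryObject).getD name_1 [] = c1 :=
          by rw [PySem.Dict.getD_eq_get?_getD, h1]; rfl
        have hc2 : (PySem.Dict.mk dictionaryObject).getD name_0 [] = c2 :=
          by rw [PySem.Dict.getD_eq_get?_getD, h0]; rfl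
        have hc3 : (PySem.Dict.mk dictionaryObject).getD name_2 [] = c3 :=
          by rw [PySem.Dict.getD_eq_get?_getD, h2]; rfl
        rw [hc1, hc2, hc3] at hforall
        obtain ⟨-, -, -, hall⟩ := hforall
        rw [pvFoldA_eq _ _ _ _ _ _ _ _ ?_]
        · simp only [zero_add, pvCount_eq_cnt]
        · intro k hk x v2 hp hv
          have hkmem : k ∈ c1.map Prod.fst := by
            have := hk
            simpa [PySem.Dict.keys_mk] using this
          obtain ⟨-, -, hdup⟩ := hall k hkmem
          obtain ⟨h3, h2', hx⟩ := pvPair?_some hp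
          have hg3 : (PySem.Dict.mk c3).getD k 0 = var_4 := by rw [PySem.Dict.getD_eq_get?_getD, h3]; rfl
          have hg2 : (PySem.Dict.mk c2).get? k = some 0 ∨ (PySem.Dict.mk c2).get? k = some 1 := by
            rcases hv with h | h
            · exact Or.inl (by rw [h2']; simp [h])
            · exact Or.inr (by rw [h2']; simp [h])
          have := hdup hg3 hg2
          simp only at hx; rw [hx]; exact this
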